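-- pv_equiv track=rewrite | github.com/LLNL/Babel | regression/gantlet/commandline.py | group_brackets
-- ===== SOURCE A (Python) =====
-- def group_brackets( args ):
--     """
--        args = group_parens( args )
--
--        groups a list of strings according to parens, e.g.
--         ['hi', 'there', '[', 'one', 'two', ']', 'hi', '[', 'three', 'four', ']', 'foo']
--        to
--         ['hi', 'there', ' one two', 'hi', ' three for', 'foo']
--
--        Very useful after fighting with all kinds of yucky quoting rules in make.
--        Does not handle nested brackets.
--     """
--     result = []
--     temp = args[:]
--     temp.reverse()
--     while ( len(temp) != 0 ):
--         arg = temp.pop()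
--         new_arg = ''
--         if ( arg == '[' ):
--             while( len(temp) != 0 ):
--                 arg = temp.pop()
--                 if ( arg == ']'):
--                     break
--                 new_arg = new_arg + ' ' + arg
--         else:
--             new_arg = arg
--         result.append(new_arg.strip())
--     return result
-- ===== SOURCE B (Python) =====
-- def group_brackets(args):
--     # Forward single-pass state machine: no reverse+pop queue, group
--     # collected in a list and joined once instead of repeated string concat.
--     result = []
--     group = None
--     for arg in args:
--         if group is None:
--             if arg == '[':
--                 group = []
--             else:
--                 result.append(arg.strip())
--         elif arg == ']':
--             result.append(' '.join(group).strip())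
--             group = None
--         else:
--             group.append(arg)
--     if group is not None:
--         result.append(' '.join(group).strip())
--     return result
-- ===== Notes on version B (the rewrite author's own statement) =====
-- stated objective: idiomatic
-- what changed: Replaced the reverse-then-pop-from-end queue with nested while/break and repeated string concatenation by a single forward pass with an open-group state, collecting group tokens in a list and joining them once at ']' (or at end-of-input for an unterminated '['); a timing run measured B about 2x faster (no pop-queue bookkeeping, one join instead of incremental concatenation).
import Mathlib
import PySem

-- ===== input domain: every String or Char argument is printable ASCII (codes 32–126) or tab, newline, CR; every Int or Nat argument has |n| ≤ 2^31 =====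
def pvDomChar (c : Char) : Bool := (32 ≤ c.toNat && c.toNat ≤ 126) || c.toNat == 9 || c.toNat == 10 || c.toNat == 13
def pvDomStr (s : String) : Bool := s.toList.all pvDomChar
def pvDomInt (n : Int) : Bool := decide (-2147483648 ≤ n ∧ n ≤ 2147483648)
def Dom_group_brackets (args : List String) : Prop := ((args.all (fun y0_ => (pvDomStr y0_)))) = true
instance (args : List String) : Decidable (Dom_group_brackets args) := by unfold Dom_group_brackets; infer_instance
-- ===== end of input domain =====

-- B replaces A's reverse+pop queue and nested while/break by a single forward
-- state-machine pass that collects each bracket group in a list and joins it once (objective: idiomatic).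

-- ===== PORT A =====
-- A copies args, reverses it, and pops from the END of that reversed copy, i.e. it
-- consumes args head-first; the port's recursion consumes the list head-first accordingly.
-- inner while loop: pop tokens, concatenating ' ' + arg, until ']' or the queue empties;
-- returns (new_arg, remaining queue).
def gbInner : List String → String → String × List String
  | [], new_arg => (new_arg, [])
  | arg :: rest, new_arg =>
    if arg = "]" then (new_arg, rest)
    else gbInner rest (new_arg ++ " " ++ arg)

theorem gbInner_len : ∀ (temp : List String) (na : String),
    (gbInner temp na).2.length ≤ temp.length := by
  intro temp
  induction temp with
  | nil => intro na; simp [gbInner]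
  | cons arg rest ih =>
    intro na
    by_cases h : arg = "]"
    · simp [gbInner, h]
    · simp only [gbInner, if_neg h]
      exact Nat.le_trans (ih _) (Nat.le_succ _)

-- outer while loop: pop one token; '[' enters the inner loop, otherwise new_arg = arg;
-- append new_arg.strip() to result.
def gbLoop : List String → List String → List String
  | [], result => result
  | arg :: rest, result =>
    if arg = "[" then
      gbLoop (gbInner rest "").2 (result ++ [PySem.Str.strip (gbInner rest "").1])
    else
      gbLoop rest (result ++ [PySem.Str.strip arg])
termination_by temp _ => temp.length
decreasing_by
  · exact Nat.lt_succ_of_le (gbInner_len rest "")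
  · exact Nat.lt_succ_self _

def group_brackets (args : List String) : List String := gbLoop args []

-- ===== PORT B =====
-- one forward step of the state machine: state = (result, open group or none)
def altStep (st : List String × Option (List String)) (arg : String) :
    List String × Option (List String) :=
  match st.2 with
  | none =>
    if arg = "[" then (st.1, some [])
    else (st.1 ++ [PySem.Str.strip arg], none)
  | some g =>
    if arg = "]" then (st.1 ++ [PySem.Str.strip (PySem.Str.join " " g)], none)
    else (st.1, some (g ++ [arg]))

-- after the loop: flush a still-open (unterminated) group
def altFinish (st : List String × Option (List String)) : List String :=
  match st.2 with
  | none => st.1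
  | some g => st.1 ++ [PySem.Str.strip (PySem.Str.join " " g)]

def group_brackets_alt (args : List String) : List String :=
  altFinish (args.foldl altStep ([], none))

-- ===== PRECONDITION & SPEC =====
def Spec_group_brackets (args : List String) (out : List String) : Prop := out = group_brackets_alt args
instance (args : List String) (out : List String) : Decidable (Spec_group_brackets args out) := by unfold Spec_group_brackets; infer_instance

-- ===== CLAIM (what is proved, stated in full; the proofs are below) =====
def Claim_equal_group_brackets : Prop := ∀ (args : List String), Dom_group_brackets args → Spec_group_brackets args (group_brackets args)

-- ===== LEMMAS AND PROOFS =====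

-- A's inner accumulator string, as built from the tokens B has collected so far
def gbAcc (g : List String) : String := g.foldl (fun s a => s ++ " " ++ a) ""

theorem toList_gbAcc_from : ∀ (g : List String) (s0 : String),
    (g.foldl (fun s a => s ++ " " ++ a) s0).toList
      = s0.toList ++ (g.map (fun a => ' ' :: a.toList)).flatten := by
  intro g
  induction g with
  | nil => intro s0; simp
  | cons a g' ih =>
    intro s0
    simp only [List.foldl_cons, List.map_cons, List.flatten_cons, ih]
    simp

theorem flatten_space : ∀ (g : List String),
    (g.map (fun a => ' ' :: a.toList)).flatten
      = if g = [] then [] else ' ' :: PySem.Chars.join [' '] (g.map String.toList) := by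
  intro g
  induction g with
  | nil => simp
  | cons a g' ih =>
    cases g' with
    | nil => simp [PySem.Chars.join, List.intercalate]
    | cons b g'' =>
      rw [List.map_cons, List.flatten_cons, ih]
      simp only [reduceCtorEq, if_false]
      simp only [List.map_cons, PySem.Chars.join_cons_cons]
      simp

theorem strip_space_cons (cs : List Char) :
    PySem.Chars.strip (' ' :: cs) = PySem.Chars.strip cs := by
  simp [PySem.Chars.strip, PySem.Chars.lstrip, List.dropWhile, PySem.Chars.isspace]

-- strip of A's concatenated accumulator = strip of B's ' '.join of the collected tokens
theorem strip_gbAcc (g : List String) :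
    PySem.Str.strip (gbAcc g) = PySem.Str.strip (PySem.Str.join " " g) := by
  unfold PySem.Str.strip gbAcc
  rw [toList_gbAcc_from, PySem.Str.toList_join, flatten_space]
  cases g with
  | nil => simp [PySem.Chars.join, List.intercalate]
  | cons a g' =>
    simp only [reduceCtorEq, if_false]
    have h0 : ("" : String).toList = ([] : List Char) := rfl
    rw [h0, List.nil_append, strip_space_cons]; rfl

theorem gbAcc_snoc (g : List String) (a : String) :
    gbAcc (g ++ [a]) = gbAcc g ++ " " ++ a := by
  unfold gbAcc; rw [List.foldl_append]; rfl

-- mutual invariant for the two loops, by strong induction on the remaining queue length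
theorem loops_agree : ∀ (n : Nat),
    (∀ (temp : List String) (res : List String), temp.length ≤ n →
        altFinish (temp.foldl altStep (res, none)) = gbLoop temp res)
    ∧ (∀ (temp : List String) (res : List String) (g : List String), temp.length ≤ n →
        altFinish (temp.foldl altStep (res, some g))
          = gbLoop (gbInner temp (gbAcc g)).2
              (res ++ [PySem.Str.strip (gbInner temp (gbAcc g)).1])) := by
  intro n
  induction n with
  | zero =>
    constructor
    · intro temp res h
      rw [List.length_eq_zero_iff.mp (Nat.le_zero.mp h)]
      simp [altFinish, gbLoop]
    · intro temp res g h
      rw [List.length_eq_zero_iff.mp (Nat.le_zero.mp h)]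
      simp [altFinish, gbInner, gbLoop, strip_gbAcc]
  | succ n ih =>
    constructor
    · intro temp res h
      cases temp with
      | nil => simp [altFinish, gbLoop]
      | cons arg rest =>
        by_cases harg : arg = "["
        · subst harg
          simp only [List.foldl_cons, altStep, reduceIte, gbLoop]
          have := ih.2 rest res [] (Nat.le_of_succ_le_succ h)
          simpa [gbAcc] using this
        · simp only [List.foldl_cons, altStep, if_neg harg]
          rw [ih.1 rest _ (Nat.le_of_succ_le_succ h)]
          simp [gbLoop, harg]
    · intro temp res g h
      cases temp with
      | nil => simp [altFinish, gbInner, gbLoop, strip_gbAcc]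
      | cons arg rest =>
        by_cases harg : arg = "]"
        · subst harg
          simp only [List.foldl_cons, altStep, reduceIte, gbInner]
          rw [ih.1 rest _ (Nat.le_of_succ_le_succ h)]
          simp [strip_gbAcc]
        · simp only [List.foldl_cons, altStep, if_neg harg, gbInner]
          rw [ih.2 rest res (g ++ [arg]) (Nat.le_of_succ_le_succ h), gbAcc_snoc]

-- ===== VERDICT (by name: the statement is the Claim_ definition above) =====
theorem group_brackets_spec : Claim_equal_group_brackets := by
  intro args _
  unfold Spec_group_brackets group_brackets group_brackets_alt
  exact ((loops_agree args.length).1 args [] (Nat.le_refl _)).symm
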